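-- pv_equiv track=rewrite | github.com/leungwai/JPM_SMM4H_1b_LW | Code/load_data.py | convert_initial_tokens
-- ===== SOURCE A (Python) =====
-- def convert_initial_tokens(encoding):
--       final_label_match = []
--       end = 0
--       for x in range(len(encoding)):
--             if encoding[x] == 102:
--                   final_label_match.append(encoding[x])
--                   end = 1
--             elif end == 1:
--                   final_label_match.append(2)
--             else:
--                   final_label_match.append(encoding[x])
--       return final_label_match
-- ===== SOURCE B (Python) =====
-- def convert_initial_tokens(encoding):
--     try:
--         idx = encoding.index(102)
--     except ValueError:
--         return list(encoding)
--     return list(encoding[:idx + 1]) + [v if v == 102 else 2 for v in encoding[idx + 1:]]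
-- ===== Notes on version B (the rewrite author's own statement) =====
-- stated objective: simpler
-- what changed: Replaces the stateful flag loop with finding the first 102 once, copying the prefix verbatim and mapping the suffix (102 stays 102, everything else becomes 2).
import Mathlib
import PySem

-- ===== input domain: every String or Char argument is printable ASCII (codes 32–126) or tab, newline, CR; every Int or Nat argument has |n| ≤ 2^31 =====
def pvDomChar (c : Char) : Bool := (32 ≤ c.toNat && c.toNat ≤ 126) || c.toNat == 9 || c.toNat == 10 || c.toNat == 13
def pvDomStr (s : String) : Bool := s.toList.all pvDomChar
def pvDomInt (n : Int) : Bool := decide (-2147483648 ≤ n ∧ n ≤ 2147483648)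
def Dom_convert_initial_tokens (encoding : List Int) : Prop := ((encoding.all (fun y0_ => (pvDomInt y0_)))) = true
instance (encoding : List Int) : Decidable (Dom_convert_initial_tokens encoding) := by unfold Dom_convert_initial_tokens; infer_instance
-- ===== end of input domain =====

-- B finds the first 102 once, copies the prefix verbatim and maps the suffix
-- (102 stays 102, everything else becomes 2), instead of A's stateful flag loop;
-- objective: simpler.


-- ===== PORT A =====
-- the loop body: state = (final_label_match, end)
def pvStepA (st : List Int × Int) (v : Int) : List Int × Int :=
  if v = 102 then (st.1 ++ [v], 1)
  else if st.2 = 1 then (st.1 ++ [2], st.2)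
  else (st.1 ++ [v], st.2)

def convert_initial_tokens (encoding : List Int) : List Int :=
  (encoding.foldl pvStepA ([], 0)).1

-- ===== PORT B =====
def convert_initial_tokens_alt (encoding : List Int) : List Int :=
  match PySem.List.index? encoding 102 with
  | none => encoding
  | some idx =>
      PySem.List.slice encoding none (some ((idx : Int) + 1)) ++
        (PySem.List.slice encoding (some ((idx : Int) + 1)) none).map
          (fun v => if v = 102 then v else 2)

-- ===== PRECONDITION & SPEC =====
def Spec_convert_initial_tokens (encoding : List Int) (out : List Int) : Prop := out = convert_initial_tokens_alt encoding
instance (encoding : List Int) (out : List Int) : Decidable (Spec_convert_initial_tokens encoding out) := by unfold Spec_convert_initial_tokens; infer_instance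

-- ===== CLAIM (what is proved, stated in full; the proofs are below) =====
def Claim_equal_convert_initial_tokens : Prop := ∀ (encoding : List Int), Dom_convert_initial_tokens encoding → Spec_convert_initial_tokens encoding (convert_initial_tokens encoding)

-- ===== LEMMAS AND PROOFS =====

-- reference recursion: f0 = before the first 102, f1 = after (flag set)
def pvF1 (l : List Int) : List Int := l.map (fun v => if v = 102 then v else 2)

def pvF0 : List Int → List Int
  | [] => []
  | v :: t => if v = 102 then v :: pvF1 t else v :: pvF0 t

theorem pvFoldA_acc (l : List Int) (acc : List Int) (e : Int) :
    (l.foldl pvStepA (acc, e)).1 = acc ++ (l.foldl pvStepA ([], e)).1 := by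
  induction l generalizing acc e with
  | nil => simp
  | cons v t ih =>
    simp only [List.foldl_cons, pvStepA]
    split_ifs
    · rw [ih (acc ++ [v]) 1, ih ([] ++ [v]) 1]; simp
    · rw [ih (acc ++ [2]) e, ih ([] ++ [2]) e]; simp
    · rw [ih (acc ++ [v]) e, ih ([] ++ [v]) e]; simp

theorem pvFoldA_one (l : List Int) :
    (l.foldl pvStepA ([], 1)).1 = pvF1 l := by
  induction l with
  | nil => rfl
  | cons v t ih =>
    simp only [List.foldl_cons, pvStepA, pvF1, List.map_cons]
    split_ifs with h <;> (rw [pvFoldA_acc, ih]; simp [pvF1, h])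

theorem pvFoldA_zero (l : List Int) :
    (l.foldl pvStepA ([], 0)).1 = pvF0 l := by
  induction l with
  | nil => rfl
  | cons v t ih =>
    simp only [List.foldl_cons, pvStepA]
    split_ifs with h h2
    · rw [pvFoldA_acc, pvFoldA_one]; simp [pvF0, pvF1, h]
    · exact absurd h2 (by norm_num)
    · rw [pvFoldA_acc, ih]; simp [pvF0, h]

theorem pvAltEq (l : List Int) : convert_initial_tokens_alt l = pvF0 l := by
  induction l with
  | nil => rfl
  | cons v t ih =>
    by_cases h : v = 102
    · subst h
      unfold convert_initial_tokens_alt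
      rw [PySem.List.index?_cons_self]
      dsimp only
      rw [PySem.List.slice_to _ (by norm_num), PySem.List.slice_from _ (by norm_num)]
      simp [pvF0, pvF1]
    · unfold convert_initial_tokens_alt
      rw [PySem.List.index?_cons_of_ne t h]
      cases hidx : PySem.List.index? t 102 with
      | none =>
        have ht : pvF0 t = t := by
          rw [← ih]; unfold convert_initial_tokens_alt; rw [hidx]
        simp [pvF0, h, ht]
      | some k =>
        simp only [Option.map_some]
        have ht : pvF0 t = t.take (k + 1) ++
            (t.drop (k + 1)).map (fun v => if v = 102 then v else 2) := by
          rw [← ih]; unfold convert_initial_tokens_alt; rw [hidx]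
          dsimp only
          rw [PySem.List.slice_to _ (by omega), PySem.List.slice_from _ (by omega)]
          norm_num
        rw [PySem.List.slice_to _ (by omega), PySem.List.slice_from _ (by omega)]
        have h2 : (((k + 1 : Nat) : Int) + 1).toNat = k + 2 := by omega
        rw [h2]
        simp [pvF0, h, ht, List.take_succ_cons, List.drop_succ_cons]

-- ===== VERDICT (by name: the statement is the Claim_ definition above) =====
theorem convert_initial_tokens_spec : Claim_equal_convert_initial_tokens := by
  intro encoding _
  unfold Spec_convert_initial_tokens convert_initial_tokens
  rw [pvFoldA_zero, pvAltEq]
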